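-- pv_equiv track=rewrite | github.com/sanh09/mainProj | backend/llm_summarizer.py | _normalize_for_similarity
-- ===== SOURCE A (Python) =====
-- def _normalize_for_similarity(text: str) -> str:
--     raw = (text or "").strip().lower()
--     if not raw:
--         return ""
--     for ch in [",", ".", "?", "!", ":", ";", "(", ")", "[", "]", "{", "}", "'"]:
--         raw = raw.replace(ch, " ")
--     tokens = raw.split()
--     stop = {"and", "or", "the", "to", "of", "in", "on", "for", "with"}
--     tokens = [t for t in tokens if t not in stop]
--     return " ".join(tokens)
-- ===== SOURCE B (Python) =====
-- def _normalize_for_similarity(text: str) -> str: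
--     stop = {"and", "or", "the", "to", "of", "in", "on", "for", "with"}
--     punct = set(",.?!:;()[]{}'")
--     out = []
--     buf = []
--     for ch in (text or "").lower():
--         if ch in punct or ch.isspace():
--             if buf:
--                 w = "".join(buf)
--                 if w not in stop:
--                     out.append(w)
--                 buf = []
--         else:
--             buf.append(ch)
--     if buf:
--         w = "".join(buf)
--         if w not in stop:
--             out.append(w)
--     return " ".join(out)
-- ===== Notes on version B (the rewrite author's own statement) =====
-- stated objective: alternative
-- what changed: Replaced the multi-pass pipeline (strip, 13 successive str.replace passes, split, filter) by a single character-scan tokenizer that maintains a word buffer and flushes non-stopword tokens at punctuation/whitespace boundaries.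
import Mathlib
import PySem

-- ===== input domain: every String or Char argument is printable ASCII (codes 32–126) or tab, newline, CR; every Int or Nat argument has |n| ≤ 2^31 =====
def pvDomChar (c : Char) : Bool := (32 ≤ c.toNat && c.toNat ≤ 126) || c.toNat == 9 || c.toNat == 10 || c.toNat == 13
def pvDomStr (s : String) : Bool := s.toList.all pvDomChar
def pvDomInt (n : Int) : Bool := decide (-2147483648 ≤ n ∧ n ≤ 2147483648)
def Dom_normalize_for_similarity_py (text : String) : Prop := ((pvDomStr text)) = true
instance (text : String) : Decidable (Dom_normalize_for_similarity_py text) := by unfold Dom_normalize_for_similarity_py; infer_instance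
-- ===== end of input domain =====

-- B replaces A's multi-pass pipeline (strip, 13 str.replace passes, split, filter)
-- by a single character scan with a word buffer flushed at punctuation/whitespace boundaries.


-- ===== PORT A =====
def pvPunctA : List Char := [',', '.', '?', '!', ':', ';', '(', ')', '[', ']', '{', '}', '\'']
def pvStopA : List (List Char) :=
  ["and".toList, "or".toList, "the".toList, "to".toList, "of".toList, "in".toList, "on".toList, "for".toList, "with".toList]

def normalize_for_similarity_py (text : String) : String :=
  let raw := PySem.Chars.lower (PySem.Chars.strip text.toList)
  if raw.isEmpty then "" else
  let raw2 := pvPunctA.foldl (fun r ch => PySem.Chars.replace r [ch] [' ']) raw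
  let tokens := PySem.Chars.split₀ raw2
  let tokens2 := tokens.filter (fun t => !(pvStopA.contains t))
  String.mk (PySem.Chars.join [' '] tokens2)

-- ===== PORT B =====
def pvStopB : List (List Char) :=
  ["and".toList, "or".toList, "the".toList, "to".toList, "of".toList, "in".toList, "on".toList, "for".toList, "with".toList]
def pvPunctB : List Char := [',', '.', '?', '!', ':', ';', '(', ')', '[', ']', '{', '}', '\'']

def pvBoundary (c : Char) : Bool := pvPunctB.contains c || PySem.Chars.isspace c

def pvFlush (out : List (List Char)) (buf : List Char) : List (List Char) :=
  if buf.isEmpty then out else if pvStopB.contains buf then out else out ++ [buf]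

def pvScan : List Char → List (List Char) → List Char → List (List Char)
  | [], out, buf => pvFlush out buf
  | c :: rest, out, buf =>
      if pvBoundary c then pvScan rest (pvFlush out buf) [] else pvScan rest out (buf ++ [c])

def normalize_for_similarity_py_alt (text : String) : String :=
  String.mk (PySem.Chars.join [' '] (pvScan (PySem.Chars.lower text.toList) [] []))

-- ===== PRECONDITION & SPEC =====
def Spec_normalize_for_similarity_py (text : String) (out : String) : Prop := out = normalize_for_similarity_py_alt text
instance (text : String) (out : String) : Decidable (Spec_normalize_for_similarity_py text out) := by unfold Spec_normalize_for_similarity_py; infer_instance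

-- ===== CLAIM (what is proved, stated in full; the proofs are below) =====
def Claim_equal_normalize_for_similarity_py : Prop := ∀ (text : String), Dom_normalize_for_similarity_py text → Spec_normalize_for_similarity_py text (normalize_for_similarity_py text)

-- ===== LEMMAS AND PROOFS =====

-- proof-only helper: the pointwise effect of A's 13 replace passes
def pvSubst (c : Char) : Char := if pvPunctA.contains c then ' ' else c

theorem pv_S_nil (cur : List Char) (acc : List (List Char)) :
    PySem.Chars.split₀.go [] cur acc
      = if cur.isEmpty then acc.reverse else (cur.reverse :: acc).reverse := by
  rw [PySem.Chars.split₀.go]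

theorem pv_S_cons (c : Char) (rest cur : List Char) (acc : List (List Char)) :
    PySem.Chars.split₀.go (c :: rest) cur acc
      = if PySem.Chars.isspace c then
          (if cur.isEmpty then PySem.Chars.split₀.go rest [] acc
           else PySem.Chars.split₀.go rest [] (cur.reverse :: acc))
        else PySem.Chars.split₀.go rest (c :: cur) acc := by
  rw [PySem.Chars.split₀.go]

theorem pv_isspace_false (c : Char) (h1 : 65 ≤ c.toNat) (h2 : c.toNat ≤ 122) :
    PySem.Chars.isspace c = false := by
  unfold PySem.Chars.isspace
  simp only [Bool.or_eq_false_iff, Bool.and_eq_false_iff, decide_eq_false_iff_not]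
  omega

theorem pv_isspace_lower (c : Char) :
    PySem.Chars.isspace (PySem.Chars.lowerChar c) = PySem.Chars.isspace c := by
  unfold PySem.Chars.lowerChar PySem.Chars.isupper
  split
  · next h =>
    simp only [Bool.and_eq_true, decide_eq_true_eq, Char.le_def, UInt32.le_iff_toNat_le] at h
    have hA : ('A').val.toNat = 65 := rfl
    have hZ : ('Z').val.toNat = 90 := rfl
    have h' : 65 ≤ c.toNat ∧ c.toNat ≤ 90 := by unfold Char.toNat; omega
    have hv : (c.toNat + 32).isValidChar := by left; omega
    have ht : (Char.ofNat (c.toNat + 32)).toNat = c.toNat + 32 := by rw [Char.toNat_ofNat, if_pos hv]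
    rw [pv_isspace_false _ (by omega) (by omega), pv_isspace_false _ (by omega) (by omega)]
  · rfl

theorem pv_isspace_subst (c : Char) : PySem.Chars.isspace (pvSubst c) = pvBoundary c := by
  unfold pvSubst pvBoundary
  by_cases h : pvPunctA.contains c = true
  · have hp : pvPunctB.contains c = true := h
    rw [if_pos h, hp, Bool.true_or]
    decide
  · have h' : pvPunctA.contains c = false := Bool.eq_false_iff.mpr h
    have hp : pvPunctB.contains c = false := h'
    rw [if_neg h, hp, Bool.false_or]

theorem pv_replace_go_single (a b : Char) : ∀ (fuel : Nat) (l acc : List Char), l.length ≤ fuel →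
    PySem.Chars.replace.go [a] [b] fuel l acc
      = acc.reverse ++ l.map (fun c => if c = a then b else c) := by
  intro fuel
  induction fuel with
  | zero =>
      intro l acc h
      have hl : l = [] := List.eq_nil_of_length_eq_zero (Nat.le_zero.mp h)
      subst hl
      simp [PySem.Chars.replace.go]
  | succ f ih =>
      intro l acc h
      cases l with
      | nil => simp [PySem.Chars.replace.go]
      | cons c t =>
          have hpre : [a].isPrefixOf (c :: t) = (a == c) := by
            simp [List.isPrefixOf]
          rw [PySem.Chars.replace.go]
          by_cases hac : a = c
          · subst hac
            rw [hpre]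
            simp only [beq_self_eq_true, if_pos]
            rw [ih _ _ (by simpa using Nat.le_of_succ_le_succ h)]
            simp
          · have hbe : (a == c) = false := by simp [hac]
            rw [hpre, hbe]
            simp only [Bool.false_eq_true, if_neg, not_false_iff]
            rw [ih _ _ (by simpa using Nat.le_of_succ_le_succ h)]
            have hca : ¬ (c = a) := fun hh => hac hh.symm
            simp [hca]

theorem pv_replace_single (a b : Char) (s : List Char) :
    PySem.Chars.replace s [a] [b] = s.map (fun c => if c = a then b else c) := by
  unfold PySem.Chars.replace
  simp only [List.isEmpty_cons, Bool.false_eq_true, if_neg, not_false_iff]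
  exact pv_replace_go_single a b s.length s [] le_rfl

theorem pv_foldl_replace (ps : List Char) (hsp : ps.contains ' ' = false) : ∀ s : List Char,
    ps.foldl (fun r ch => PySem.Chars.replace r [ch] [' ']) s
      = s.map (fun c => if ps.contains c then ' ' else c) := by
  induction ps with
  | nil => intro s; simp
  | cons a ps ih =>
      intro s
      have hsp' : ps.contains ' ' = false := by
        simp only [List.contains_cons, Bool.or_eq_false_iff] at hsp
        exact hsp.2
      rw [List.foldl_cons, pv_replace_single, ih hsp', List.map_map]
      congr 1
      funext c
      simp only [Function.comp]
      by_cases hca : c = a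
      · subst hca
        simp [List.contains_cons, hsp']
      · have hbe : (c == a) = false := by simp [hca]
        simp only [if_neg hca, List.contains_cons, hbe, Bool.false_or]

theorem pv_S_acc : ∀ (l cur : List Char) (acc : List (List Char)),
    PySem.Chars.split₀.go l cur acc = acc.reverse ++ PySem.Chars.split₀.go l cur [] := by
  intro l
  induction l with
  | nil =>
      intro cur acc
      by_cases h : cur.isEmpty = true <;> simp [pv_S_nil, h]
  | cons c rest ih =>
      intro cur acc
      by_cases hs : PySem.Chars.isspace c = true
      · by_cases hc : cur.isEmpty = true
        · rw [pv_S_cons, pv_S_cons, if_pos hs, if_pos hs, if_pos hc, if_pos hc]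
          exact ih [] acc
        · rw [pv_S_cons, pv_S_cons, if_pos hs, if_pos hs, if_neg hc, if_neg hc,
            ih [] (cur.reverse :: acc), ih [] [cur.reverse]]
          simp
      · rw [pv_S_cons, pv_S_cons, if_neg (by simp [hs]), if_neg (by simp [hs])]
        exact ih (c :: cur) acc

theorem pv_S_ws_end : ∀ (l : List Char), (∀ c ∈ l, PySem.Chars.isspace c = true) →
    ∀ (cur : List Char) (acc : List (List Char)),
    PySem.Chars.split₀.go l cur acc = PySem.Chars.split₀.go [] cur acc := by
  intro l
  induction l with
  | nil => intro _ cur acc; rfl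
  | cons c rest ih =>
      intro h cur acc
      have hc := h c (List.mem_cons_self ..)
      have hrest : ∀ x ∈ rest, PySem.Chars.isspace x = true := fun x hx => h x (List.mem_cons_of_mem _ hx)
      by_cases hcur : cur.isEmpty = true
      · rw [pv_S_cons, if_pos hc, if_pos hcur, ih hrest, pv_S_nil, pv_S_nil]
        simp [hcur]
      · rw [pv_S_cons, if_pos hc, if_neg hcur, ih hrest, pv_S_nil, pv_S_nil]
        simp [hcur]

theorem pv_S_ws_append (l₂ : List Char) (h : ∀ c ∈ l₂, PySem.Chars.isspace c = true) :
    ∀ (l₁ cur : List Char) (acc : List (List Char)),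
    PySem.Chars.split₀.go (l₁ ++ l₂) cur acc = PySem.Chars.split₀.go l₁ cur acc := by
  intro l₁
  induction l₁ with
  | nil =>
      intro cur acc
      rw [List.nil_append, pv_S_ws_end l₂ h]
  | cons c rest ih =>
      intro cur acc
      rw [List.cons_append, pv_S_cons, pv_S_cons]
      by_cases hs : PySem.Chars.isspace c = true
      · by_cases hcur : cur.isEmpty = true
        · rw [if_pos hs, if_pos hs, if_pos hcur, if_pos hcur, ih]
        · rw [if_pos hs, if_pos hs, if_neg hcur, if_neg hcur, ih]
      · rw [if_neg (by simp [hs]), if_neg (by simp [hs]), ih]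

theorem pv_S_ws_pre (l₁ : List Char) (h : ∀ c ∈ l₁, PySem.Chars.isspace c = true) :
    ∀ (rest : List Char) (acc : List (List Char)),
    PySem.Chars.split₀.go (l₁ ++ rest) [] acc = PySem.Chars.split₀.go rest [] acc := by
  induction l₁ with
  | nil => intro rest acc; rfl
  | cons c t ih =>
      intro rest acc
      have hc := h c (List.mem_cons_self ..)
      rw [List.cons_append, pv_S_cons, if_pos hc]
      simp only [List.isEmpty_nil, if_true]
      exact ih (fun x hx => h x (List.mem_cons_of_mem _ hx)) rest acc

theorem pv_scan_acc : ∀ (l : List Char) (out : List (List Char)) (buf : List Char),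
    pvScan l out buf = out ++ pvScan l [] buf := by
  intro l
  induction l with
  | nil =>
      intro out buf
      simp only [pvScan, pvFlush]
      by_cases h1 : buf.isEmpty = true
      · simp [h1]
      · by_cases h2 : buf ∈ pvStopB <;> simp [h1, h2]
  | cons c rest ih =>
      intro out buf
      by_cases hb : pvBoundary c = true
      · simp only [pvScan, hb, if_true]
        rw [ih (pvFlush out buf) [], ih (pvFlush [] buf) []]
        unfold pvFlush
        by_cases h1 : buf.isEmpty = true
        · simp [h1]
        · by_cases h2 : buf ∈ pvStopB <;> simp [h1, h2]
      · simp only [pvScan, hb, Bool.false_eq_true, if_false]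
        exact ih out (buf ++ [c])

theorem pv_flush_filter (buf : List Char) (h : ¬ buf.isEmpty = true) :
    pvFlush [] buf = List.filter (fun t => !(pvStopA.contains t)) [buf] := by
  unfold pvFlush
  rw [if_neg h]
  have heq : pvStopB = pvStopA := rfl
  rw [heq]
  by_cases h2 : buf ∈ pvStopA
  · simp [List.filter, h2, List.contains_iff_mem.mpr h2]
  · have hc : pvStopA.contains buf = false := by
      cases hh : pvStopA.contains buf
      · rfl
      · exact absurd (List.contains_iff_mem.mp hh) h2
    simp [List.filter, h2, hc]

theorem pv_core : ∀ (l buf : List Char),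
    pvScan l [] buf
      = (PySem.Chars.split₀.go (l.map pvSubst) buf.reverse []).filter (fun t => !(pvStopA.contains t)) := by
  intro l
  induction l with
  | nil =>
      intro buf
      simp only [List.map_nil, pvScan, pv_S_nil]
      by_cases h1 : buf.isEmpty = true
      · have hb : buf = [] := by cases buf <;> simp_all
        subst hb
        simp [pvFlush]
      · have hrev : buf.reverse.isEmpty = false := by cases buf <;> simp_all
        rw [hrev]
        simp only [Bool.false_eq_true, if_neg, not_false_iff, List.reverse_reverse,
          List.reverse_cons, List.reverse_nil, List.nil_append]
        exact pv_flush_filter buf h1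
  | cons c rest ih =>
      intro buf
      by_cases hb : pvBoundary c = true
      · have hsp : PySem.Chars.isspace (pvSubst c) = true := by rw [pv_isspace_subst, hb]
        simp only [List.map_cons, pvScan, hb, if_true, pv_S_cons, hsp]
        rw [pv_scan_acc rest (pvFlush [] buf) []]
        by_cases h1 : buf.isEmpty = true
        · have hb' : buf = [] := by cases buf <;> simp_all
          subst hb'
          simp only [List.reverse_nil, List.isEmpty_nil, if_pos rfl]
          rw [ih []]
          simp [pvFlush]
        · have hrev : buf.reverse.isEmpty = false := by cases buf <;> simp_all
          rw [hrev]
          simp only [Bool.false_eq_true, if_neg, not_false_iff, List.reverse_reverse]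
          rw [pv_S_acc _ _ [buf], List.filter_append, ih []]
          congr 1
          exact pv_flush_filter buf h1
      · have hsp : PySem.Chars.isspace (pvSubst c) = false := by
          rw [pv_isspace_subst]; exact Bool.eq_false_iff.mpr hb
        have hsubst : pvSubst c = c := by
          unfold pvSubst
          have hmem : c ∉ pvPunctA := by
            intro hm
            apply hb
            unfold pvBoundary
            have hcb : pvPunctB.contains c = true := List.contains_iff_mem.mpr hm
            rw [hcb, Bool.true_or]
          exact if_neg (fun hcc => hmem (List.contains_iff_mem.mp hcc))
        simp only [List.map_cons, pvScan, hb, Bool.false_eq_true, if_neg, not_false_iff,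
          pv_S_cons, hsp]
        rw [ih (buf ++ [c])]
        simp [hsubst]

-- the strip decomposition: a string is (ws prefix) ++ strip ++ (ws suffix)
theorem pv_strip_decomp (cs : List Char) :
    cs = cs.takeWhile PySem.Chars.isspace ++ PySem.Chars.strip cs
          ++ ((PySem.Chars.lstrip cs).reverse.takeWhile PySem.Chars.isspace).reverse := by
  unfold PySem.Chars.strip PySem.Chars.rstrip PySem.Chars.lstrip
  conv_lhs => rw [← List.takeWhile_append_dropWhile (p := PySem.Chars.isspace) (l := cs)]
  rw [List.append_assoc]
  congr 1
  set t := cs.dropWhile PySem.Chars.isspace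
  conv_lhs => rw [← List.reverse_reverse t,
    ← List.takeWhile_append_dropWhile (p := PySem.Chars.isspace) (l := t.reverse)]
  rw [List.reverse_append]

theorem pv_tokens_eq (cs : List Char) :
    pvScan (PySem.Chars.lower cs) [] []
      = (PySem.Chars.split₀.go ((PySem.Chars.lower (PySem.Chars.strip cs)).map pvSubst) [] []).filter
          (fun t => !(pvStopA.contains t)) := by
  rw [pv_core]
  simp only [List.reverse_nil]
  have hws1 : ∀ c ∈ ((cs.takeWhile PySem.Chars.isspace).map PySem.Chars.lowerChar).map pvSubst,
      PySem.Chars.isspace c = true := by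
    intro c hc
    rcases List.mem_map.mp hc with ⟨y, hy, rfl⟩
    rcases List.mem_map.mp hy with ⟨x, hx, rfl⟩
    rw [pv_isspace_subst]
    unfold pvBoundary
    rw [pv_isspace_lower, List.mem_takeWhile_imp hx]
    simp
  have hws2 : ∀ c ∈ ((((PySem.Chars.lstrip cs).reverse.takeWhile PySem.Chars.isspace).reverse).map
      PySem.Chars.lowerChar).map pvSubst, PySem.Chars.isspace c = true := by
    intro c hc
    rcases List.mem_map.mp hc with ⟨y, hy, rfl⟩
    rcases List.mem_map.mp hy with ⟨x, hx, rfl⟩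
    rw [pv_isspace_subst]
    unfold pvBoundary
    rw [pv_isspace_lower, List.mem_takeWhile_imp (List.mem_reverse.mp hx)]
    simp
  conv_lhs => rw [pv_strip_decomp cs]
  unfold PySem.Chars.lower
  rw [List.map_append, List.map_append, List.map_append, List.map_append,
    pv_S_ws_append _ hws2, pv_S_ws_pre _ hws1]

-- ===== VERDICT (by name: the statement is the Claim_ definition above) =====
theorem normalize_for_similarity_py_spec : Claim_equal_normalize_for_similarity_py := by
  intro text _
  unfold Spec_normalize_for_similarity_py normalize_for_similarity_py normalize_for_similarity_py_alt
  rw [pv_tokens_eq]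
  by_cases h : (PySem.Chars.lower (PySem.Chars.strip text.toList)).isEmpty = true
  · have : PySem.Chars.lower (PySem.Chars.strip text.toList) = [] := by
      cases hh : PySem.Chars.lower (PySem.Chars.strip text.toList) <;> simp_all
    simp only [h, if_true, this, List.map_nil]
    simp only [pv_S_nil, List.isEmpty_nil, if_true, List.reverse_nil, List.filter_nil]
    rfl
  · simp only [h, Bool.false_eq_true, if_neg, not_false_iff]
    rw [pv_foldl_replace pvPunctA (by decide)]
    unfold PySem.Chars.split₀
    rfl
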